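-- pv_equiv track=rewrite | github.com/ItsAksharaRathore/Medismart_AI | medismart_ai/core/prescription/interpreter.py | _extract_medications
-- ===== SOURCE A (Python) =====
-- def _extract_medications(entities, context):
--     """Extract medications with dosages and instructions"""
--     medications = []
--
--     if 'MEDICATION' in entities and entities['MEDICATION']:
--         for i, med in enumerate(entities['MEDICATION']):
--             medication = {
--                 'name': med,
--                 'dosage': _get_dosage(entities, i),
--                 'frequency': _get_frequency(entities, i),
--                 'duration': _get_duration(entities, i),
--                 'route': _get_route(entities, i),
--                 'instructions': _get_med_instructions(entities, i),
--                 'strength': _get_strength(entities, i)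
--             }
--             medications.append(medication)
--
--     return medications
--
-- def _get_dosage(entities, index):
--     """Get dosage for medication at given index"""
--     if 'DOSAGE' in entities and len(entities['DOSAGE']) > index:
--         return entities['DOSAGE'][index]
--     return None
--
-- def _get_frequency(entities, index):
--     """Get frequency for medication at given index"""
--     if 'FREQUENCY' in entities and len(entities['FREQUENCY']) > index:
--         return entities['FREQUENCY'][index]
--     return None
--
-- def _get_duration(entities, index):
--     """Get duration for medication at given index"""
--     if 'DURATION' in entities and len(entities['DURATION']) > index:
--         return entities['DURATION'][index]
--     return None
--
-- def _get_route(entities, index):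
--     """Get administration route for medication at given index"""
--     if 'ROUTE' in entities and len(entities['ROUTE']) > index:
--         return entities['ROUTE'][index]
--     return None
--
-- def _get_med_instructions(entities, index):
--     """Get specific instructions for medication at given index"""
--     if 'MED_INSTRUCTION' in entities and len(entities['MED_INSTRUCTION']) > index:
--         return entities['MED_INSTRUCTION'][index]
--     return None
--
-- def _get_strength(entities, index):
--     """Get medication strength at given index"""
--     if 'STRENGTH' in entities and len(entities['STRENGTH']) > index:
--         return entities['STRENGTH'][index]
--     return None
-- ===== SOURCE B (Python) =====
-- def _extract_medications(entities, context):
--     """Columnar strategy: pad each attribute column to the medication count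
--     with None, then zip all seven columns into row dicts."""
--     meds = entities.get('MEDICATION')
--     if not meds:
--         return []
--     n = len(meds)
--
--     def pad(key):
--         col = entities.get(key, [])[:n]
--         return col + [None] * (n - len(col))
--
--     return [{'name': m, 'dosage': d, 'frequency': f, 'duration': du,
--              'route': r, 'instructions': ins, 'strength': s}
--             for m, d, f, du, r, ins, s in
--             zip(meds, pad('DOSAGE'), pad('FREQUENCY'), pad('DURATION'),
--                 pad('ROUTE'), pad('MED_INSTRUCTION'), pad('STRENGTH'))]
-- ===== Notes on version B (the rewrite author's own statement) =====
-- stated objective: alternative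
-- what changed: Replaces A's per-medication guarded lookups through six helper functions by a columnar algorithm: each attribute column is padded with None to the medication count, then all seven columns are zipped into the row dicts.
import Mathlib
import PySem

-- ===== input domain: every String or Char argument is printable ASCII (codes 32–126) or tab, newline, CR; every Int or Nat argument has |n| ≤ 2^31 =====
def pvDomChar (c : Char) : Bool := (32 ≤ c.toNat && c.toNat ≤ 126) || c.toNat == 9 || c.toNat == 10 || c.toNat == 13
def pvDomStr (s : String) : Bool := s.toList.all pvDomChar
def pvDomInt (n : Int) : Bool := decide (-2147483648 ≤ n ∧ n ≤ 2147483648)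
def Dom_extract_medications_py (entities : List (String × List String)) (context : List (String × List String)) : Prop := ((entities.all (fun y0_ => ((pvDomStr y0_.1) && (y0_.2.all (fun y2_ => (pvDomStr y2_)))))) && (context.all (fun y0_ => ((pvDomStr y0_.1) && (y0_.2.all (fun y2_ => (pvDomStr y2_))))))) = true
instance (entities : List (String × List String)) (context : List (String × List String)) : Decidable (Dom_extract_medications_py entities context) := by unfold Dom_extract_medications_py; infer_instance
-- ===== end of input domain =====

-- B builds the rows columnar: each attribute column is padded with None to the
-- medication count and the seven columns are zipped into rows (objective: alternative).

-- ===== PORT A =====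
-- dict membership/lookup on the association list (first match)
def pvAssocGet (entities : List (String × List String)) (k : String) : Option (List String) :=
  match entities with
  | [] => none
  | (k', v) :: rest => if k' == k then some v else pvAssocGet rest k

def get_dosage_py (entities : List (String × List String)) (index : Int) : Option String :=
  match pvAssocGet entities "DOSAGE" with
  | some l => if PySem.List.len l > index then PySem.List.pyGet? l index else none
  | none => none

def get_frequency_py (entities : List (String × List String)) (index : Int) : Option String :=
  match pvAssocGet entities "FREQUENCY" with
  | some l => if PySem.List.len l > index then PySem.List.pyGet? l index else none
  | none => none

def get_duration_py (entities : List (String × List String)) (index : Int) : Option String :=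
  match pvAssocGet entities "DURATION" with
  | some l => if PySem.List.len l > index then PySem.List.pyGet? l index else none
  | none => none

def get_route_py (entities : List (String × List String)) (index : Int) : Option String :=
  match pvAssocGet entities "ROUTE" with
  | some l => if PySem.List.len l > index then PySem.List.pyGet? l index else none
  | none => none

def get_med_instructions_py (entities : List (String × List String)) (index : Int) : Option String :=
  match pvAssocGet entities "MED_INSTRUCTION" with
  | some l => if PySem.List.len l > index then PySem.List.pyGet? l index else none
  | none => none

def get_strength_py (entities : List (String × List String)) (index : Int) : Option String :=
  match pvAssocGet entities "STRENGTH" with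
  | some l => if PySem.List.len l > index then PySem.List.pyGet? l index else none
  | none => none

def extract_medications_py (entities : List (String × List String)) (_context : List (String × List String)) : List (List (String × Option String)) :=
  match pvAssocGet entities "MEDICATION" with
  | none => []
  | some meds =>
    if meds = [] then []
    else
      (PySem.List.enumerate meds).foldl (fun medications p =>
        medications ++ [[("name", some p.2),
                         ("dosage", get_dosage_py entities p.1),
                         ("frequency", get_frequency_py entities p.1),
                         ("duration", get_duration_py entities p.1),
                         ("route", get_route_py entities p.1),
                         ("instructions", get_med_instructions_py entities p.1),
                         ("strength", get_strength_py entities p.1)]]) []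

-- ===== PORT B =====
-- Source B's pad(key): entities.get(key, [])[:n] padded with None to length n
-- (the slice's string entries are lifted to `some` since the padded column holds Optionals)
def pvPad (entities : List (String × List String)) (key : String) (n : Nat) : List (Option String) :=
  let col := (PySem.List.slice ((pvAssocGet entities key).getD []) none (some (n : Int))).map some
  col ++ List.replicate (n - col.length) none

-- Python's zip over the seven parallel iterables (stops at the shortest)
def pvZip7 {α β : Type} : List α → List β → List β → List β → List β → List β → List β → List (α × β × β × β × β × β × β)
  | a :: as, b :: bs, c :: cs, d :: ds, e :: es, f :: fs, g :: gs =>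
      (a, b, c, d, e, f, g) :: pvZip7 as bs cs ds es fs gs
  | _, _, _, _, _, _, _ => []

def extract_medications_py_alt (entities : List (String × List String)) (_context : List (String × List String)) : List (List (String × Option String)) :=
  match pvAssocGet entities "MEDICATION" with
  | none => []
  | some meds =>
    if meds = [] then []
    else
      let n := meds.length
      (pvZip7 meds (pvPad entities "DOSAGE" n) (pvPad entities "FREQUENCY" n)
              (pvPad entities "DURATION" n) (pvPad entities "ROUTE" n)
              (pvPad entities "MED_INSTRUCTION" n) (pvPad entities "STRENGTH" n)).map
        (fun r => [("name", some r.1), ("dosage", r.2.1), ("frequency", r.2.2.1),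
                   ("duration", r.2.2.2.1), ("route", r.2.2.2.2.1),
                   ("instructions", r.2.2.2.2.2.1), ("strength", r.2.2.2.2.2.2)])

-- ===== PRECONDITION & SPEC =====
def Spec_extract_medications_py (entities : List (String × List String)) (context : List (String × List String)) (out : List (List (String × Option String))) : Prop := out = extract_medications_py_alt entities context
instance (entities : List (String × List String)) (context : List (String × List String)) (out : List (List (String × Option String))) : Decidable (Spec_extract_medications_py entities context out) := by unfold Spec_extract_medications_py; infer_instance

-- ===== CLAIM =====
def Claim_equal_extract_medications_py : Prop := ∀ (entities : List (String × List String)) (context : List (String × List String)), Dom_extract_medications_py entities context → Spec_extract_medications_py entities context (extract_medications_py entities context)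

-- ===== LEMMAS AND PROOFS =====
theorem pv_pad_length (entities : List (String × List String)) (key : String) (n : Nat) :
    (pvPad entities key n).length = n := by
  unfold pvPad
  simp [PySem.List.slice_to_natCast]

-- the padded column at index k < n is exactly A's guarded lookup into the raw column
theorem pv_pad_eq_guard (entities : List (String × List String)) (key : String)
    (n k : Nat) (hk : k < n) (h : k < (pvPad entities key n).length) :
    (pvPad entities key n)[k] =
      (match pvAssocGet entities key with
       | some l => if PySem.List.len l > (k : Int) then PySem.List.pyGet? l (k : Int) else none
       | none => none) := by
  cases hg : pvAssocGet entities key with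
  | none =>
    unfold pvPad
    simp only [hg, Option.getD_none, PySem.List.slice_to_natCast]
    simp
  | some l =>
    unfold pvPad
    simp only [hg, Option.getD_some, PySem.List.slice_to_natCast]
    by_cases hkl : k < l.length
    · have hleft : k < ((l.take n).map some).length := by simp; omega
      rw [List.getElem_append_left hleft]
      have hlen : PySem.List.len l > (k : Int) := by
        simp [PySem.List.len]; omega
      simp [hkl]
    · have hge : ((l.take n).map some).length ≤ k := by simp; omega
      rw [List.getElem_append_right hge]
      have hlen : ¬ PySem.List.len l > (k : Int) := by
        simp [PySem.List.len]; omega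
      simp
      omega


theorem pv_zip7_length {α β : Type} : ∀ (a : List α) (pb pc pd pe pf pg : List β),
    pb.length = a.length → pc.length = a.length → pd.length = a.length →
    pe.length = a.length → pf.length = a.length → pg.length = a.length →
    (pvZip7 a pb pc pd pe pf pg).length = a.length := by
  intro a
  induction a with
  | nil => intro pb pc pd pe pf pg _ _ _ _ _ _; cases pb <;> simp [pvZip7]
  | cons x xs ih =>
    intro pb pc pd pe pf pg hb hc hd he hf hg
    cases pb with
    | nil => simp at hb
    | cons b0 bs =>
      cases pc with
      | nil => simp at hc
      | cons c0 cs =>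
        cases pd with
        | nil => simp at hd
        | cons d0 ds =>
          cases pe with
          | nil => simp at he
          | cons e0 es =>
            cases pf with
            | nil => simp at hf
            | cons f0 fs =>
              cases pg with
              | nil => simp at hg
              | cons g0 gs =>
                simp only [pvZip7, List.length_cons, Nat.add_left_inj]
                exact ih bs cs ds es fs gs (by simpa using hb) (by simpa using hc)
                  (by simpa using hd) (by simpa using he) (by simpa using hf) (by simpa using hg)

theorem pv_zip7_getElem {α β : Type} : ∀ (a : List α) (pb pc pd pe pf pg : List β)
    (hb : pb.length = a.length) (hc : pc.length = a.length) (hd : pd.length = a.length)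
    (he : pe.length = a.length) (hf : pf.length = a.length) (hg : pg.length = a.length)
    (k : Nat) (hk : k < a.length) (h : k < (pvZip7 a pb pc pd pe pf pg).length),
    (pvZip7 a pb pc pd pe pf pg)[k] =
      (a[k], pb[k]'(by omega), pc[k]'(by omega), pd[k]'(by omega),
       pe[k]'(by omega), pf[k]'(by omega), pg[k]'(by omega)) := by
  intro a
  induction a with
  | nil => intro pb pc pd pe pf pg _ _ _ _ _ _ k hk; simp at hk
  | cons x xs ih =>
    intro pb pc pd pe pf pg hb hc hd he hf hg k hk h
    cases pb with
    | nil => simp at hb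
    | cons b0 bs =>
      cases pc with
      | nil => simp at hc
      | cons c0 cs =>
        cases pd with
        | nil => simp at hd
        | cons d0 ds =>
          cases pe with
          | nil => simp at he
          | cons e0 es =>
            cases pf with
            | nil => simp at hf
            | cons f0 fs =>
              cases pg with
              | nil => simp at hg
              | cons g0 gs =>
                cases k with
                | zero => simp [pvZip7]
                | succ k' =>
                  simp only [pvZip7, List.getElem_cons_succ]
                  exact ih bs cs ds es fs gs (by simpa using hb) (by simpa using hc)
                    (by simpa using hd) (by simpa using he) (by simpa using hf)
                    (by simpa using hg) k' (by simpa using hk)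
                    (by rw [pv_zip7_length xs bs cs ds es fs gs (by simpa using hb)
                          (by simpa using hc) (by simpa using hd) (by simpa using he)
                          (by simpa using hf) (by simpa using hg)]
                        simpa using hk)

-- ===== VERDICT =====
theorem extract_medications_py_spec : Claim_equal_extract_medications_py := by
  intro entities context _
  unfold Spec_extract_medications_py extract_medications_py extract_medications_py_alt
  cases hm : pvAssocGet entities "MEDICATION" with
  | none => rfl
  | some meds =>
    by_cases hnil : meds = []
    · simp [hnil]
    · simp only [hnil, if_false]
      rw [PySem.List.foldl_append_singleton_eq_map, List.nil_append]
      have hb := pv_pad_length entities "DOSAGE" meds.length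
      have hc := pv_pad_length entities "FREQUENCY" meds.length
      have hd := pv_pad_length entities "DURATION" meds.length
      have he := pv_pad_length entities "ROUTE" meds.length
      have hf := pv_pad_length entities "MED_INSTRUCTION" meds.length
      have hg := pv_pad_length entities "STRENGTH" meds.length
      have hzlen := pv_zip7_length meds _ _ _ _ _ _ hb hc hd he hf hg
      apply List.ext_getElem
      · simp [PySem.List.length_enumerate, hzlen]
      · intro k h1 h2
        have hkn : k < meds.length := by
          simpa [PySem.List.length_enumerate] using h1
        simp only [List.getElem_map]
        rw [PySem.List.getElem_enumerate,
            pv_zip7_getElem meds _ _ _ _ _ _ hb hc hd he hf hg k hkn (by omega)]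
        simp only [get_dosage_py, get_frequency_py, get_duration_py, get_route_py,
          get_med_instructions_py, get_strength_py, zero_add,
          pv_pad_eq_guard entities "DOSAGE" meds.length k hkn,
          pv_pad_eq_guard entities "FREQUENCY" meds.length k hkn,
          pv_pad_eq_guard entities "DURATION" meds.length k hkn,
          pv_pad_eq_guard entities "ROUTE" meds.length k hkn,
          pv_pad_eq_guard entities "MED_INSTRUCTION" meds.length k hkn,
          pv_pad_eq_guard entities "STRENGTH" meds.length k hkn]
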